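-- pv_equiv track=rewrite | github.com/openedx-unsupported/edx-analytics-pipeline | edx/analytics/tasks/event_analysis.py | get_numeric_slug
-- ===== SOURCE A (Python) =====
-- def get_numeric_slug(value_string):
--     if len(value_string) == 0:
--         return ""
--     # If string contains only digits, then return (int<len>).
--     if value_string.isdigit():
--         return u"(int{})".format(len(value_string))
--
--     hex_digits = set('0123456789abcdefABCDEF')
--     if all(c in hex_digits for c in value_string):
--         return u"(hex{})".format(len(value_string))
--
--     # If string contains digits and letters, then return (hash<len>).
--     if any(char.isdigit() for char in value_string):
--         return u"(alnum{})".format(len(value_string))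
--
--     return value_string
-- ===== SOURCE B (Python) =====
-- _HEX = "0123456789abcdefABCDEF"
--
-- def get_numeric_slug(value_string):
--     if not value_string:
--         return ""
--     all_digit = True
--     all_hex = True
--     any_digit = False
--     for c in value_string:
--         d = c.isdigit()
--         all_digit = all_digit and d
--         all_hex = all_hex and (c in _HEX)
--         any_digit = any_digit or d
--     n = len(value_string)
--     if all_digit:
--         return u"(int{})".format(n)
--     if all_hex:
--         return u"(hex{})".format(n)
--     if any_digit:
--         return u"(alnum{})".format(n)
--     return value_string
-- ===== Notes on version B (the rewrite author's own statement) =====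
-- stated objective: alternative
-- what changed: B replaces A's three separate scans (isdigit, all-in-hex-set generator, any-digit generator) with one fused loop over the characters maintaining three booleans (all_digit, all_hex, any_digit), then branches once in the same priority order.
import Mathlib
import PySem

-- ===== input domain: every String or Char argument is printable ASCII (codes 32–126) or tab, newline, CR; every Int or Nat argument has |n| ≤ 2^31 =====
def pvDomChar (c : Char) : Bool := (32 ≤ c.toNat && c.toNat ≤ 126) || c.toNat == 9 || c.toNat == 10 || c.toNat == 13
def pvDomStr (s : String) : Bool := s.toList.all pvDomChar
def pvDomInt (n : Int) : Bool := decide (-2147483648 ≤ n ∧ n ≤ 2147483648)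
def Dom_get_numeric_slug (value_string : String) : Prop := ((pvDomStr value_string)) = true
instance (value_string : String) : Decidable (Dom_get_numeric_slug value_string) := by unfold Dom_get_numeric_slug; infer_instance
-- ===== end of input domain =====

-- B fuses A's three separate scans into one loop over the characters keeping three booleans; same branch priority.

-- ===== PORT A =====
-- set('0123456789abcdefABCDEF')
def pvHexSet : PySem.Set Char := PySem.Set.ofList "0123456789abcdefABCDEF".toList

def get_numeric_slug (value_string : String) : String :=
  let cs := value_string.toList
  if cs.length = 0 then ""
  else if PySem.Chars.strIsdigit cs then
    "(int" ++ PySem.Int.toStr cs.length ++ ")"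
  else if cs.all (fun c => pvHexSet.contains c) then
    "(hex" ++ PySem.Int.toStr cs.length ++ ")"
  else if cs.any (fun c => PySem.Chars.isdigit c) then
    "(alnum" ++ PySem.Int.toStr cs.length ++ ")"
  else value_string

-- ===== PORT B =====
-- single-character containment 'c in "0123…"' is exactly list membership of the char
def pvHexChars : List Char := "0123456789abcdefABCDEF".toList

def get_numeric_slug_alt (value_string : String) : String :=
  let cs := value_string.toList
  if cs.isEmpty then ""
  else
    let flags : Bool × Bool × Bool :=
      cs.foldl
        (fun s c =>
          let d := PySem.Chars.isdigit c
          (s.1 && d, s.2.1 && pvHexChars.contains c, s.2.2 || d))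
        (true, true, false)
    if flags.1 then "(int" ++ PySem.Int.toStr cs.length ++ ")"
    else if flags.2.1 then "(hex" ++ PySem.Int.toStr cs.length ++ ")"
    else if flags.2.2 then "(alnum" ++ PySem.Int.toStr cs.length ++ ")"
    else value_string

-- ===== PRECONDITION & SPEC =====
def Spec_get_numeric_slug (value_string : String) (out : String) : Prop := out = get_numeric_slug_alt value_string
instance (value_string : String) (out : String) : Decidable (Spec_get_numeric_slug value_string out) := by unfold Spec_get_numeric_slug; infer_instance

-- ===== CLAIM (what is proved, stated in full; the proofs are below) =====
def Claim_equal_get_numeric_slug : Prop := ∀ (value_string : String), Dom_get_numeric_slug value_string → Spec_get_numeric_slug value_string (get_numeric_slug value_string)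

-- ===== LEMMAS AND PROOFS =====

-- B's fused fold computes exactly the three independent scans
theorem pv_fold_flags (cs : List Char) (a h d : Bool) :
    cs.foldl
      (fun (s : Bool × Bool × Bool) c =>
        let d := PySem.Chars.isdigit c
        (s.1 && d, s.2.1 && pvHexChars.contains c, s.2.2 || d))
      (a, h, d)
    = (a && cs.all (fun c => PySem.Chars.isdigit c),
       h && cs.all (fun c => pvHexChars.contains c),
       d || cs.any (fun c => PySem.Chars.isdigit c)) := by
  induction cs generalizing a h d with
  | nil => simp
  | cons c cs ih =>
    simp only [List.foldl_cons, List.all_cons, List.any_cons, ih]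
    simp [Bool.and_assoc, Bool.or_assoc]

theorem pv_set_contains (c : Char) : pvHexSet.contains c = pvHexChars.contains c := by
  simp [pvHexSet, pvHexChars, pysem]

theorem pv_strIsdigit (cs : List Char) :
    PySem.Chars.strIsdigit cs = (!cs.isEmpty && cs.all (fun c => PySem.Chars.isdigit c)) := by
  simp [PySem.Chars.strIsdigit]

-- ===== VERDICT (by name: the statement is the Claim_ definition above) =====
theorem get_numeric_slug_spec : Claim_equal_get_numeric_slug := by
  intro s _
  unfold Spec_get_numeric_slug get_numeric_slug get_numeric_slug_alt
  simp only [pv_fold_flags, pv_strIsdigit, pv_set_contains, Bool.true_and, Bool.false_or]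
  by_cases hne : s.toList.isEmpty
  · simp [List.isEmpty_iff.mp hne]
  · have hs : s ≠ "" := fun h => hne (by simp [h])
    simp [hne, hs]
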